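-- pv_equiv track=rewrite | github.com/amromics/amromics | amromics/libs/alignment.py | genPresentMark
-- ===== SOURCE A (Python) =====
-- def genPresentMark(total, index):
--     str_i=""
--     for i in range(0,total):
--         if not i == index:
--             str_i=str_i+"\t"+"."
--         else:
--             str_i=str_i+"\t1"
--     return str_i
-- ===== SOURCE B (Python) =====
-- def genPresentMark(total, index):
--     cells = ["\t."] * total
--     if 0 <= index < total:
--         cells[index] = "\t1"
--     return "".join(cells)
-- ===== Notes on version B (the rewrite author's own statement) =====
-- stated objective: simpler
-- what changed: Replaces A's per-element accumulation loop with a closed-form construction: replicate the '\t.' cell total times as a list, overwrite the cell at index with '\t1' when it is in range, and join once.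
import Mathlib
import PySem

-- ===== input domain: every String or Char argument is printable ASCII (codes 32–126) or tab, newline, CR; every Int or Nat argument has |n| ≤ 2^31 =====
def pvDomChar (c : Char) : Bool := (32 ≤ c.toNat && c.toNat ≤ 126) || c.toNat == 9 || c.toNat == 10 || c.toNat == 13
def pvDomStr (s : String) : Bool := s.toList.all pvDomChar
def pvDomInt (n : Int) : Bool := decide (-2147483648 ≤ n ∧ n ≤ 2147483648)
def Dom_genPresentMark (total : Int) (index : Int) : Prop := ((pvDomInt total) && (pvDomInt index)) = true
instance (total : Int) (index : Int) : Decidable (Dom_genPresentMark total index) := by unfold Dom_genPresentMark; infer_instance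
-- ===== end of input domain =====

-- B replaces A's per-element accumulation loop with a replicated cell list, one point
-- update at the index, and a single join (objective: simpler).

-- ===== PORT A =====
-- literal transliteration of A's loop: fold over range(0, total) accumulating str_i
def genPresentMark (total : Int) (index : Int) : String :=
  (PySem.List.pyRange 0 total 1).foldl
    (fun str_i i => if ¬ (i == index) then str_i ++ "\t" ++ "." else str_i ++ "\t1") ""

-- ===== PORT B =====
-- cells = ["\t."] * total; mark the hit cell (only under the range guard); join
def genPresentMark_alt (total : Int) (index : Int) : String :=
  let cells := List.replicate total.toNat "\t."
  let cells := if 0 ≤ index ∧ index < total then cells.set index.toNat "\t1" else cells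
  String.join cells

-- ===== PRECONDITION & SPEC =====
def Spec_genPresentMark (total : Int) (index : Int) (out : String) : Prop := out = genPresentMark_alt total index
instance (total : Int) (index : Int) (out : String) : Decidable (Spec_genPresentMark total index out) := by unfold Spec_genPresentMark; infer_instance

-- ===== CLAIM (what is proved, stated in full; the proofs are below) =====
def Claim_equal_genPresentMark : Prop := ∀ (total : Int) (index : Int), Dom_genPresentMark total index → Spec_genPresentMark total index (genPresentMark total index)

-- ===== LEMMAS AND PROOFS =====

-- proof-side closed form for a repeated piece
def pyStrMulN (s : String) : Nat → String
  | 0 => ""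
  | n + 1 => s ++ pyStrMulN s n

lemma foldl_append_str (l : List String) : ∀ s : String, l.foldl (· ++ ·) s = s ++ l.foldl (· ++ ·) "" := by
  induction l with
  | nil => intro s; simp
  | cons a l ih => intro s; simp only [List.foldl_cons]; rw [ih (s ++ a), ih ("" ++ a)]; simp [String.append_assoc]

lemma join_nil : String.join ([] : List String) = "" := by simp [String.join]

lemma join_cons (a : String) (l : List String) : String.join (a :: l) = a ++ String.join l := by
  simp only [String.join, List.foldl_cons]
  rw [foldl_append_str l ("" ++ a)]
  simp

lemma join_replicate (s : String) : ∀ n : Nat, String.join (List.replicate n s) = pyStrMulN s n := by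
  intro n
  induction n with
  | zero => simp [join_nil, pyStrMulN]
  | succ n ih => simp [List.replicate_succ, join_cons, pyStrMulN, ih]

lemma join_append (l1 l2 : List String) : String.join (l1 ++ l2) = String.join l1 ++ String.join l2 := by
  induction l1 with
  | nil => simp [join_nil]
  | cons a l ih => simp [join_cons, ih, String.append_assoc]

lemma join_set_replicate (s t : String) (n i : Nat) (h : i < n) :
    String.join ((List.replicate n s).set i t) =
      pyStrMulN s i ++ t ++ pyStrMulN s (n - 1 - i) := by
  rw [List.set_eq_take_append_cons_drop, if_pos (by simp [h])]
  have h1 : (List.replicate n s).take i = List.replicate i s := by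
    simp [List.take_replicate]; omega
  have h2 : (List.replicate n s).drop (i + 1) = List.replicate (n - 1 - i) s := by
    simp [List.drop_replicate]; omega
  rw [h1, h2, join_append, join_cons, join_replicate, join_replicate]
  simp [String.append_assoc]

-- loop invariant: folding A's body over range a..a+n appends the closed-form block
lemma genPresentMark_fold (index : Int) :
    ∀ (n : Nat) (a : Int) (s0 : String),
      (PySem.List.pyRange a (a + n) 1).foldl
        (fun str_i i => if ¬ (i == index) then str_i ++ "\t" ++ "." else str_i ++ "\t1") s0
      = s0 ++ (if a ≤ index ∧ index < a + n then
                 pyStrMulN "\t." (index - a).toNat ++ "\t1" ++ pyStrMulN "\t." (a + n - 1 - index).toNat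
               else pyStrMulN "\t." n) := by
  intro n
  induction n with
  | zero =>
    intro a s0
    rw [PySem.List.pyRange_one_eq_nil (by omega)]
    have h : ¬ (a ≤ index ∧ index < a) := by omega
    simp [h, pyStrMulN]
  | succ n ih =>
    intro a s0
    rw [PySem.List.pyRange_one_cons (by push_cast; omega)]
    have harg : a + ((n : Int) + 1) = (a + 1) + n := by ring
    simp only [List.foldl_cons]
    push_cast
    rw [harg, ih (a + 1)]
    by_cases hai : a = index
    · subst hai
      have h1 : ¬ ((a : Int) + 1 ≤ a ∧ a < a + 1 + n) := by omega
      have h2 : (a ≤ a ∧ a < a + 1 + (n : Int)) := by omega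
      have h4 : (a + 1 + (n : Int) - 1 - a).toNat = n := by omega
      rw [if_neg h1, if_pos h2]
      simp [h4, pyStrMulN, String.append_assoc]
    · have hbeq : ¬ ((a : Int) == index) = true := by simp [hai]
      simp only [hbeq]
      by_cases hin : a + 1 ≤ index ∧ index < a + 1 + (n : Int)
      · have h2 : a ≤ index ∧ index < a + 1 + (n : Int) := by omega
        have h3 : (index - a).toNat = (index - (a + 1)).toNat + 1 := by omega
        rw [if_pos hin, if_pos h2, h3]
        simp [pyStrMulN, String.append_assoc]
      · have h2 : ¬ (a ≤ index ∧ index < a + 1 + (n : Int)) := by omega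
        rw [if_neg hin, if_neg h2]
        simp [pyStrMulN, String.append_assoc]

-- ===== VERDICT (by name: the statement is the Claim_ definition above) =====
theorem genPresentMark_spec : Claim_equal_genPresentMark := by
  intro total index _
  unfold Spec_genPresentMark genPresentMark genPresentMark_alt
  by_cases hpos : 0 < total
  · have htn : (0 : Int) + (total.toNat : Int) = total := by omega
    have hfold := genPresentMark_fold index total.toNat 0 ""
    rw [htn] at hfold
    rw [hfold]
    by_cases h : 0 ≤ index ∧ index < total
    · have h3 : (index - 0).toNat = index.toNat := by omega
      have hlt : index.toNat < total.toNat := by omega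
      rw [if_pos h]
      simp only [if_pos h]
      rw [join_set_replicate _ _ _ _ hlt, h3]
      have h4 : (total - 1 - index).toNat = total.toNat - 1 - index.toNat := by omega
      simp [h4]
    · rw [if_neg h]
      simp only [if_neg h]
      rw [join_replicate]
      simp
  · rw [PySem.List.pyRange_one_eq_nil (by omega)]
    have h : ¬ (0 ≤ index ∧ index < total) := by omega
    have ht : total.toNat = 0 := by omega
    simp [h, ht, join_nil]
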